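-- pv_equiv track=rewrite | github.com/couchbase/testrunner | pytests/security/ipv6_ipv4_tests.py | verify_logs
-- ===== SOURCE A (Python) =====
-- def verify_logs(logs=[], verification_string=[]):
--     logic = True
--     for check_string in verification_string:
--         check_presence = False
--         for val in logs:
--             if check_string in val:
--                 check_presence = True
--         logic = logic and check_presence
--     return logic
-- ===== SOURCE B (Python) =====
-- def verify_logs(logs=[], verification_string=[]):
--     remaining = set(verification_string)
--     for val in logs:
--         if not remaining:
--             break
--         remaining = {s for s in remaining if s not in val}
--     return not remaining
-- ===== Notes on version B (the rewrite author's own statement) =====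
-- stated objective: alternative
-- what changed: Inverts the traversal: logs become the outer loop and a shrinking set of still-unmatched strings (with early exit once empty) replaces the per-string boolean flag over a full inner scan of all logs.
import Mathlib
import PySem

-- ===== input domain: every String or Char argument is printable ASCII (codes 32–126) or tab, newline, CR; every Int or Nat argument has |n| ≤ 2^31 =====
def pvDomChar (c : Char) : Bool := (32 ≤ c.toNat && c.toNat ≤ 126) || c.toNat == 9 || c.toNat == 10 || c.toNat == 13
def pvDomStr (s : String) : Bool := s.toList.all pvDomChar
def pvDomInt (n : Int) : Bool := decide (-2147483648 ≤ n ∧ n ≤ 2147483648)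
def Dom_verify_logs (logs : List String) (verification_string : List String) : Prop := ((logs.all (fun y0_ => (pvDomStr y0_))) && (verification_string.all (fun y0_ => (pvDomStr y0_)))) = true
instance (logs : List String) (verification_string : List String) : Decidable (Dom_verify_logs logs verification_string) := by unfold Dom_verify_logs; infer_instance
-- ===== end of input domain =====

-- B inverts the traversal (logs outer) and shrinks a set of still-unmatched strings; same return value, no speed claim.

-- ===== PORT A =====
def verify_logs (logs : List String) (verification_string : List String) : Bool :=
  verification_string.foldl
    (fun logic check_string =>
      let check_presence :=
        logs.foldl (fun cp val => if PySem.Str.isIn check_string val then true else cp) false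
      logic && check_presence)
    true

-- ===== PORT B =====
def verify_logs_alt (logs : List String) (verification_string : List String) : Bool :=
  let remaining :=
    logs.foldl
      (fun rem val =>
        if rem.isEmpty then rem  -- the 'break' once nothing is left to match
        else rem.filter (fun s => !(PySem.Str.isIn s val)))
      (PySem.Set.ofList verification_string)
  remaining.isEmpty

-- ===== PRECONDITION & SPEC =====
def Spec_verify_logs (logs : List String) (verification_string : List String) (out : Bool) : Prop := out = verify_logs_alt logs verification_string
instance (logs : List String) (verification_string : List String) (out : Bool) : Decidable (Spec_verify_logs logs verification_string out) := by unfold Spec_verify_logs; infer_instance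

-- ===== CLAIM (what is proved, stated in full; the proofs are below) =====
def Claim_equal_verify_logs : Prop := ∀ (logs : List String) (verification_string : List String), Dom_verify_logs logs verification_string → Spec_verify_logs logs verification_string (verify_logs logs verification_string)

-- ===== LEMMAS AND PROOFS =====

-- ===== VERDICT (by name: the statement is the Claim_ definition above) =====
-- A's inner loop: the flag ends true iff some log contains the string.
theorem pv_inner (logs : List String) (c : String) (b : Bool) :
    logs.foldl (fun cp val => if PySem.Str.isIn c val then true else cp) b
      = (b || logs.any (fun val => PySem.Str.isIn c val)) := by
  induction logs generalizing b with
  | nil => simp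
  | cons v t ih =>
    simp only [List.foldl_cons, List.any_cons, ih]
    by_cases h : PySem.Str.isIn c v = true <;>
      simp only [PySem.Str.isIn_eq] at h <;>
      cases b <;> simp [h]

-- A's outer loop is an 'all' over the verification strings.
theorem pv_outer (vs : List String) (f : String → Bool) (b : Bool) :
    vs.foldl (fun logic s => logic && f s) b = (b && vs.all f) := by
  induction vs generalizing b with
  | nil => simp
  | cons s t ih => simp [ih, Bool.and_assoc]

-- B's fold over the logs filters the initial set by "no log contains it".
theorem pv_bfold (logs : List String) (rem : List String) :
    logs.foldl
      (fun rem val => if rem.isEmpty then rem else rem.filter (fun s => !(PySem.Str.isIn s val)))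
      rem
    = rem.filter (fun s => logs.all (fun val => !(PySem.Str.isIn s val))) := by
  induction logs generalizing rem with
  | nil => simp
  | cons v t ih =>
    have hstep : (if rem.isEmpty then rem else rem.filter (fun s => !(PySem.Str.isIn s v)))
        = rem.filter (fun s => !(PySem.Str.isIn s v)) := by
      cases rem <;> simp
    simp only [List.foldl_cons, hstep, ih, List.filter_filter, List.all_cons]
    congr 1
    funext a
    exact Bool.and_comm _ _

theorem verify_logs_spec : Claim_equal_verify_logs := by
  intro logs vs _
  unfold Spec_verify_logs verify_logs verify_logs_alt
  simp only [pv_inner, pv_outer, pv_bfold, Bool.false_or, Bool.true_and]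
  rw [← Bool.coe_iff_coe]
  simp only [List.isEmpty_iff, List.eq_nil_iff_forall_not_mem, List.mem_filter,
    PySem.Set.mem_ofList, List.all_eq_true, List.any_eq_true, not_and,
    Bool.not_eq_true']
  constructor
  · intro h s hs hall
    obtain ⟨v, hv, hvi⟩ := h s hs
    rw [hall v hv] at hvi
    exact Bool.false_ne_true hvi
  · intro h s hs
    by_contra hc
    push_neg at hc
    refine h s hs ?_
    intro v hv
    by_contra hb
    exact hc v hv (by simpa using hb)
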